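-- pv_equiv track=rewrite | github.com/epilectrik/voynich | phases/EXT_ECO_02_hazard_class_discrimination/sid04_hygiene_rerun.py | is_grammar_token_strict
-- ===== SOURCE A (Python) =====
-- GRAMMAR_PREFIXES = {'qo', 'ch', 'sh', 'ok', 'da', 'ot', 'ct', 'kc', 'pc', 'fc'}
--
-- GRAMMAR_SUFFIXES = {'aiin', 'dy', 'ol', 'or', 'ar', 'ain', 'ey', 'edy', 'eey'}
--
-- HAZARD_TOKENS = set()
--
-- def is_grammar_token_strict(token: str) -> bool:
--     """Strict classification with additional filters."""
--     t = token.lower().strip()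
--
--     # Filter: empty or very short
--     if len(t) < 2:
--         return True  # Treat as grammar (exclude from residue)
--
--     # Filter: contains non-alpha (transcription artifacts)
--     if not t.isalpha():
--         return True  # Treat as grammar (exclude from residue)
--
--     # Filter: hazard tokens
--     if t in HAZARD_TOKENS:
--         return True  # Treat as grammar (exclude from residue)
--
--     # Original classification
--     for pf in GRAMMAR_PREFIXES:
--         if t.startswith(pf):
--             return True
--     for sf in GRAMMAR_SUFFIXES:
--         if t.endswith(sf):
--             return True
--
--     return False
-- ===== SOURCE B (Python) =====
-- GRAMMAR_PREFIXES = {'qo', 'ch', 'sh', 'ok', 'da', 'ot', 'ct', 'kc', 'pc', 'fc'}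
-- SUFFIXES_2 = {'dy', 'ol', 'or', 'ar', 'ey'}
-- SUFFIXES_3 = {'ain', 'edy', 'eey'}
-- SUFFIXES_4 = {'aiin'}
-- HAZARD_TOKENS = set()
--
-- def is_grammar_token_strict(token: str) -> bool:
--     """Strict classification via slice keys into length-bucketed sets."""
--     t = token.lower().strip()
--     if len(t) < 2:
--         return True
--     if not t.isalpha():
--         return True
--     if t in HAZARD_TOKENS:
--         return True
--     return (t[:2] in GRAMMAR_PREFIXES
--             or t[-2:] in SUFFIXES_2
--             or t[-3:] in SUFFIXES_3
--             or t[-4:] in SUFFIXES_4)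
-- ===== Notes on version B (the rewrite author's own statement) =====
-- stated objective: idiomatic
-- what changed: The two linear scans with startswith/endswith are replaced by direct set lookups: the 2-char prefix slice is looked up in the prefix set, and the suffixes are pre-partitioned into length-keyed sets (lengths 2, 3, 4) so each suffix slice is one membership test.
import Mathlib
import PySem

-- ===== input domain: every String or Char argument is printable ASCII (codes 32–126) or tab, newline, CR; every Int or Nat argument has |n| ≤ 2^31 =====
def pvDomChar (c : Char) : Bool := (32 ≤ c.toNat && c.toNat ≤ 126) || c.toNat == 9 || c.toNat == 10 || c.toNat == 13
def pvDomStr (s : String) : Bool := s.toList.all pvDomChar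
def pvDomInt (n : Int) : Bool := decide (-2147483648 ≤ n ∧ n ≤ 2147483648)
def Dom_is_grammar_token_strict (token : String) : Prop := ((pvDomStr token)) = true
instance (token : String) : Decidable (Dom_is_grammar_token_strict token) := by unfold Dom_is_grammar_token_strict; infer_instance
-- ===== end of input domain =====

-- B replaces A's two affix scans by direct membership lookups on slices, the suffixes
-- pre-partitioned by length (idiomatic; same asymptotic cost).

-- t = token.lower().strip()  (shared by both programs)
def pvClean (token : String) : String := PySem.Str.strip (PySem.Str.lower token)

-- ===== PORT A =====
def pvGrammarPrefixes : List String := ["qo", "ch", "sh", "ok", "da", "ot", "ct", "kc", "pc", "fc"]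
def pvGrammarSuffixes : List String := ["aiin", "dy", "ol", "or", "ar", "ain", "ey", "edy", "eey"]
def pvHazardTokens : List String := []

def is_grammar_token_strict (token : String) : Bool :=
  let t := pvClean token
  if PySem.Str.len t < 2 then true
  else if !(PySem.Str.strIsalpha t) then true
  else if pvHazardTokens.contains t then true
  else if pvGrammarPrefixes.any (fun pf => PySem.Str.startswith t pf) then true
  else if pvGrammarSuffixes.any (fun sf => PySem.Str.endswith t sf) then true
  else false

-- ===== PORT B =====
def pvSuffixes2 : List String := ["dy", "ol", "or", "ar", "ey"]
def pvSuffixes3 : List String := ["ain", "edy", "eey"]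
def pvSuffixes4 : List String := ["aiin"]

def is_grammar_token_strict_alt (token : String) : Bool :=
  let t := pvClean token
  if PySem.Str.len t < 2 then true
  else if !(PySem.Str.strIsalpha t) then true
  else if pvHazardTokens.contains t then true
  else
    pvGrammarPrefixes.contains (PySem.Str.slice t none (some 2)) ||
    pvSuffixes2.contains (PySem.Str.slice t (some (-2)) none) ||
    pvSuffixes3.contains (PySem.Str.slice t (some (-3)) none) ||
    pvSuffixes4.contains (PySem.Str.slice t (some (-4)) none)

-- ===== PRECONDITION & SPEC =====
def Spec_is_grammar_token_strict (token : String) (out : Bool) : Prop := out = is_grammar_token_strict_alt token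
instance (token : String) (out : Bool) : Decidable (Spec_is_grammar_token_strict token out) := by unfold Spec_is_grammar_token_strict; infer_instance

-- ===== CLAIM (what is proved, stated in full; the proofs are below) =====
def Claim_equal_is_grammar_token_strict : Prop := ∀ (token : String), Dom_is_grammar_token_strict token → Spec_is_grammar_token_strict token (is_grammar_token_strict token)

-- ===== LEMMAS AND PROOFS =====

-- a membership test on the k-char prefix slice equals the scan with startswith, for prefixes of uniform length k
lemma pv_contains_slice_to_eq_any_startswith (t : String) (ps : List String) (k : Nat)
    (hk : ∀ p ∈ ps, p.toList.length = k) :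
    ps.contains (PySem.Str.slice t none (some (k : Int))) =
      ps.any (fun p => PySem.Str.startswith t p) := by
  induction ps with
  | nil => rfl
  | cons p ps ih =>
    rw [List.contains_cons, List.any_cons,
      ih (fun q hq => hk q (List.mem_cons_of_mem _ hq))]
    congr 1
    rw [Bool.eq_iff_iff]
    simp only [PySem.Str.startswith_eq, PySem.Chars.startswith_iff, beq_iff_eq,
      String.ext_iff, PySem.Str.toList_slice, PySem.Chars.slice_eq_listSlice,
      PySem.List.slice_to_natCast, List.prefix_iff_eq_take, hk p List.mem_cons_self]
    exact eq_comm

-- a membership test on the k-char suffix slice equals the scan with endswith, for suffixes of uniform length k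
lemma pv_contains_slice_from_eq_any_endswith (t : String) (ps : List String) (k : Nat)
    (hk0 : 0 < k) (hk : ∀ p ∈ ps, p.toList.length = k) :
    ps.contains (PySem.Str.slice t (some (-(k : Int))) none) =
      ps.any (fun p => PySem.Str.endswith t p) := by
  induction ps with
  | nil => rfl
  | cons p ps ih =>
    rw [List.contains_cons, List.any_cons,
      ih (fun q hq => hk q (List.mem_cons_of_mem _ hq))]
    congr 1
    rw [Bool.eq_iff_iff]
    simp only [PySem.Str.endswith_eq, PySem.Chars.endswith_iff, beq_iff_eq,
      String.ext_iff, PySem.Str.toList_slice, PySem.Chars.slice_eq_listSlice,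
      PySem.List.slice_from_neg_natCast _ _ hk0, List.suffix_iff_eq_drop,
      hk p List.mem_cons_self]
    exact eq_comm

-- B's lookup disjunction equals A's two affix scans
set_option maxHeartbeats 1000000 in
lemma pv_core_eq (t : String) :
    (pvGrammarPrefixes.contains (PySem.Str.slice t none (some 2)) ||
     pvSuffixes2.contains (PySem.Str.slice t (some (-2)) none) ||
     pvSuffixes3.contains (PySem.Str.slice t (some (-3)) none) ||
     pvSuffixes4.contains (PySem.Str.slice t (some (-4)) none)) =
    ((pvGrammarPrefixes.any fun pf => PySem.Str.startswith t pf) ||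
     (pvGrammarSuffixes.any fun sf => PySem.Str.endswith t sf)) := by
  rw [show ((-2 : Int)) = (-((2 : Nat) : Int)) by norm_num,
    show ((-3 : Int)) = (-((3 : Nat) : Int)) by norm_num,
    show ((-4 : Int)) = (-((4 : Nat) : Int)) by norm_num,
    show ((2 : Int)) = (((2 : Nat) : Int)) by norm_num,
    pv_contains_slice_to_eq_any_startswith t pvGrammarPrefixes 2 (by decide),
    pv_contains_slice_from_eq_any_endswith t pvSuffixes2 2 (by norm_num) (by decide),
    pv_contains_slice_from_eq_any_endswith t pvSuffixes3 3 (by norm_num) (by decide),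
    pv_contains_slice_from_eq_any_endswith t pvSuffixes4 4 (by norm_num) (by decide)]
  simp only [pvGrammarPrefixes, pvGrammarSuffixes, pvSuffixes2, pvSuffixes3, pvSuffixes4,
    List.any_cons, List.any_nil]
  rw [Bool.eq_iff_iff]
  simp only [Bool.or_eq_true]
  tauto

-- ===== VERDICT (by name: the statement is the Claim_ definition above) =====
theorem is_grammar_token_strict_spec : Claim_equal_is_grammar_token_strict := by
  intro token _
  unfold Spec_is_grammar_token_strict is_grammar_token_strict is_grammar_token_strict_alt
  generalize pvClean token = t
  dsimp only
  rw [pv_core_eq]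
  split_ifs with h1 h2 h3 hp hs
  · rfl
  · rfl
  · rfl
  · simp only [hp, Bool.true_or]
  · simp only [hs, Bool.or_true]
  · simp only [Bool.not_eq_true] at hp hs
    simp only [hp, hs, Bool.or_false]
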